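-- pv_equiv track=rewrite | github.com/oitsjustjose/Harmonious-Engineering | emendatus_unification.py | _repl_with_ee_variant
-- ===== SOURCE A (Python) =====
-- EMENDATUS_METALS = [
--     "copper",
--     "tin",
--     "silver",
--     "lead",
--     "nickel",
--     "uranium",
--     "osmium",
--     "aluminum",
--     "zinc",
--     "cobalt",
--     "bronze",
--     "brass",
--     "constantan",
--     "electrum",
--     "steel",
--     "invar",
--     "signalum",
--     "lumium",
--     "enderium",
-- ]
--
-- MATERIAL_TYPES = ["dust", "ingot", "nugget"]
--
-- def _repl_with_ee_variant(item: str) -> str: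
--     try:
--         namespace, path = item.split(":")
--     except ValueError:
--         # Means that it's a minecraft item because namespace not included
--         return item
--
--     # Already converted case
--     if namespace == "emendatusenigmatica":
--         return item
--
--     for metal in EMENDATUS_METALS:
--         for mat in MATERIAL_TYPES:
--             if path == f"{metal}_{mat}" or path == f"{mat}_{metal}":
--                 return f"emendatusenigmatica:{metal}_{mat}"
--     return item
-- ===== SOURCE B (Python) =====
-- EMENDATUS_METALS = [
--     "copper", "tin", "silver", "lead", "nickel", "uranium", "osmium",
--     "aluminum", "zinc", "cobalt", "bronze", "brass", "constantan",
--     "electrum", "steel", "invar", "signalum", "lumium", "enderium",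
-- ]
--
-- MATERIAL_TYPES = ["dust", "ingot", "nugget"]
--
-- _METALS = frozenset(EMENDATUS_METALS)
-- _TYPES = frozenset(MATERIAL_TYPES)
--
--
-- def _repl_with_ee_variant(item: str) -> str:
--     try:
--         namespace, path = item.split(":")
--     except ValueError:
--         # Means that it's a minecraft item because namespace not included
--         return item
--
--     # Already converted case
--     if namespace == "emendatusenigmatica":
--         return item
--
--     parts = path.split("_")
--     if len(parts) == 2:
--         x, y = parts
--         if x in _METALS and y in _TYPES:
--             return f"emendatusenigmatica:{x}_{y}"
--         if x in _TYPES and y in _METALS: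
--             return f"emendatusenigmatica:{y}_{x}"
--     return item
-- ===== Notes on version B (the rewrite author's own statement) =====
-- stated objective: alternative
-- what changed: Instead of generating all 57 metal/type combination strings and comparing the path against each in both orders, B splits the path once at the underscore and does two set-membership checks on the two parts.
import Mathlib
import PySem

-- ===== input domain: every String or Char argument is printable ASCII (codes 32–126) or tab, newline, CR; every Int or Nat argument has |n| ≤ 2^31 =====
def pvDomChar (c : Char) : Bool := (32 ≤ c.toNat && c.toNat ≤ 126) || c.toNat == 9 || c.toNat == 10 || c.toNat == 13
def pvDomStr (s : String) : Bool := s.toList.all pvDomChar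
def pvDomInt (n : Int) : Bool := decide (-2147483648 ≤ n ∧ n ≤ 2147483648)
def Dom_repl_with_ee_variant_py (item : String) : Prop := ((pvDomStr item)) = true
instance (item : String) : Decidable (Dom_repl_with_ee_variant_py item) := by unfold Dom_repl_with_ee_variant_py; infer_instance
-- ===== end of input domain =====

-- B replaces A's scan comparing the path with all 57 generated metal/type combination strings
-- (in both orders) by splitting the path once at the underscore and doing two set-membership checks.

-- ===== PORT A =====
def pvEmendatusMetals : List String :=
  ["copper", "tin", "silver", "lead", "nickel", "uranium", "osmium",
   "aluminum", "zinc", "cobalt", "bronze", "brass", "constantan",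
   "electrum", "steel", "invar", "signalum", "lumium", "enderium"]

def pvMaterialTypes : List String := ["dust", "ingot", "nugget"]

-- inner 'for mat in MATERIAL_TYPES' loop: first match returns, else none
def pvInnerA (path metal : String) : List String → Option String
  | [] => none
  | mat :: rest =>
    if path == metal ++ "_" ++ mat || path == mat ++ "_" ++ metal then
      some ("emendatusenigmatica:" ++ metal ++ "_" ++ mat)
    else pvInnerA path metal rest

-- outer 'for metal in EMENDATUS_METALS' loop
def pvOuterA (path item : String) : List String → String
  | [] => item
  | metal :: rest =>
    match pvInnerA path metal pvMaterialTypes with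
    | some r => r
    | none => pvOuterA path item rest

def repl_with_ee_variant_py (item : String) : String :=
  -- 'namespace, path = item.split(":")': a split of any length other than 2 raises ValueError, caught → item
  match PySem.Str.split? item ":" with
  | some [ns, path] =>
    if ns == "emendatusenigmatica" then item
    else pvOuterA path item pvEmendatusMetals
  | _ => item

-- ===== PORT B =====
def pvMetalsSet : PySem.Set String :=
  PySem.Set.ofList
    ["copper", "tin", "silver", "lead", "nickel", "uranium", "osmium",
     "aluminum", "zinc", "cobalt", "bronze", "brass", "constantan",
     "electrum", "steel", "invar", "signalum", "lumium", "enderium"]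

def pvTypesSet : PySem.Set String := PySem.Set.ofList ["dust", "ingot", "nugget"]

def repl_with_ee_variant_py_alt (item : String) : String :=
  match PySem.Str.split? item ":" with
  | none => item
  | some parts =>
  match parts with
  | [] => item
  | [_] => item
  | _ :: _ :: _ :: _ => item
  | [ns, path] =>
    if ns == "emendatusenigmatica" then item
    else
      match PySem.Str.split? path "_" with
      | none => item
      | some parts2 =>
      match parts2 with
      | [] => item
      | [_] => item
      | _ :: _ :: _ :: _ => item
      | [x, y] =>
        if pvMetalsSet.contains x && pvTypesSet.contains y then
          "emendatusenigmatica:" ++ x ++ "_" ++ y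
        else if pvTypesSet.contains x && pvMetalsSet.contains y then
          "emendatusenigmatica:" ++ y ++ "_" ++ x
        else item

-- ===== PRECONDITION & SPEC =====
def Spec_repl_with_ee_variant_py (item : String) (out : String) : Prop := out = repl_with_ee_variant_py_alt item
instance (item : String) (out : String) : Decidable (Spec_repl_with_ee_variant_py item out) := by unfold Spec_repl_with_ee_variant_py; infer_instance

-- ===== CLAIM (what is proved, stated in full; the proofs are below) =====
def Claim_equal_repl_with_ee_variant_py : Prop := ∀ (item : String), Dom_repl_with_ee_variant_py item → Spec_repl_with_ee_variant_py item (repl_with_ee_variant_py item)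

-- ===== LEMMAS AND PROOFS =====

-- a simple structural recursion equal to PySem.Chars.splitOn for a one-character separator
def pvSplit1 (c : Char) : List Char → List (List Char)
  | [] => [[]]
  | a :: rest =>
    if a = c then [] :: pvSplit1 c rest
    else
      match pvSplit1 c rest with
      | [] => [[a]]
      | h :: t => (a :: h) :: t

def pvConsHead (x : List Char) : List (List Char) → List (List Char)
  | [] => [x]
  | h :: t => (x ++ h) :: t

def pvJoin1 (c : Char) : List (List Char) → List Char
  | [] => []
  | [p] => p
  | p :: q :: rest => p ++ c :: pvJoin1 c (q :: rest)

theorem pvSplit1_ne_nil (c : Char) (l : List Char) : pvSplit1 c l ≠ [] := by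
  cases l with
  | nil => simp [pvSplit1]
  | cons a rest =>
    simp only [pvSplit1]
    split
    · simp
    · cases h : pvSplit1 c rest <;> simp

theorem pvGo_eq (c : Char) (l : List Char) : ∀ (fuel : Nat) (cur : List Char) (acc : List (List Char)),
    l.length ≤ fuel →
    PySem.Chars.splitOn.go [c] fuel l cur acc = acc.reverse ++ pvConsHead cur.reverse (pvSplit1 c l) := by
  induction l with
  | nil =>
    intro fuel cur acc _
    cases fuel <;> simp [PySem.Chars.splitOn.go, pvSplit1, pvConsHead]
  | cons a rest ih =>
    intro fuel cur acc hf
    cases fuel with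
    | zero => simp at hf
    | succ f =>
      rw [PySem.Chars.splitOn.go]
      by_cases hac : a = c
      · subst hac
        have hpre : List.isPrefixOf [a] (a :: rest) = true := by simp [List.isPrefixOf]
        simp only [hpre, if_pos]
        rw [List.length_cons] at hf
        rw [show (List.drop [a].length (a :: rest)) = rest by simp]
        rw [ih f [] (cur.reverse :: acc) (by omega)]
        simp only [pvSplit1]
        cases h : pvSplit1 a rest with
        | nil => exact absurd h (pvSplit1_ne_nil a rest)
        | cons h0 t0 => simp [pvConsHead]
      · have hpre : List.isPrefixOf [c] (a :: rest) = false := by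
          simp [List.isPrefixOf]
          exact fun h => absurd h.symm hac
        simp only [hpre]
        rw [List.length_cons] at hf
        rw [if_neg (by simp)]
        rw [ih f (a :: cur) acc (by omega)]
        simp only [pvSplit1, if_neg hac]
        cases h : pvSplit1 c rest with
        | nil => exact absurd h (pvSplit1_ne_nil c rest)
        | cons h0 t0 => simp [pvConsHead]

theorem pvSplitOn_eq (c : Char) (s : List Char) : PySem.Chars.splitOn s [c] = pvSplit1 c s := by
  rw [PySem.Chars.splitOn, pvGo_eq c s (s.length + 1) [] [] (by omega)]
  cases h : pvSplit1 c s with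
  | nil => exact absurd h (pvSplit1_ne_nil c s)
  | cons h0 t0 => simp [pvConsHead]

theorem pvSplit1_mem (c : Char) (s : List Char) : ∀ p ∈ pvSplit1 c s, c ∉ p := by
  induction s with
  | nil => simp [pvSplit1]
  | cons a rest ih =>
    simp only [pvSplit1]
    by_cases hac : a = c
    · simp only [if_pos hac]
      intro p hp
      rcases List.mem_cons.mp hp with h | h
      · simp [h]
      · exact ih p h
    · simp only [if_neg hac]
      cases h : pvSplit1 c rest with
      | nil => exact absurd h (pvSplit1_ne_nil c rest)
      | cons h0 t0 =>
        intro p hp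
        rcases List.mem_cons.mp hp with h1 | h1
        · subst h1
          have := ih h0 (by rw [h]; exact List.mem_cons_self)
          simp only [List.mem_cons]
          rintro (he | he)
          · exact hac he.symm
          · exact this he
        · exact ih p (by rw [h]; exact List.mem_cons_of_mem _ h1)

theorem pvJoin1_split (c : Char) (s : List Char) : pvJoin1 c (pvSplit1 c s) = s := by
  induction s with
  | nil => simp [pvSplit1, pvJoin1]
  | cons a rest ih =>
    simp only [pvSplit1]
    by_cases hac : a = c
    · subst hac
      simp only [if_pos rfl]
      cases h : pvSplit1 a rest with
      | nil => exact absurd h (pvSplit1_ne_nil a rest)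
      | cons h0 t0 => rw [h] at ih; simp [pvJoin1, ih]
    · simp only [if_neg hac]
      cases h : pvSplit1 c rest with
      | nil => exact absurd h (pvSplit1_ne_nil c rest)
      | cons h0 t0 =>
        rw [h] at ih
        cases t0 with
        | nil => simp [pvJoin1] at ih ⊢; simp [ih]
        | cons q qs => simp [pvJoin1] at ih ⊢; simp [ih]

theorem pvSplit1_no (c : Char) (s : List Char) (h : c ∉ s) : pvSplit1 c s = [s] := by
  induction s with
  | nil => simp [pvSplit1]
  | cons a rest ih =>
    simp only [pvSplit1]
    have hac : a ≠ c := fun he => h (by simp [he])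
    rw [if_neg hac, ih (fun hm => h (List.mem_cons_of_mem _ hm))]

theorem pvSplit1_append (c : Char) (x y : List Char) (hx : c ∉ x) :
    pvSplit1 c (x ++ c :: y) = x :: pvSplit1 c y := by
  induction x with
  | nil => simp [pvSplit1]
  | cons a x' ih =>
    have hac : a ≠ c := fun he => hx (by simp [he])
    have hx' : c ∉ x' := fun hm => hx (List.mem_cons_of_mem _ hm)
    simp only [List.cons_append, pvSplit1, if_neg hac, ih hx']

theorem pvSplit1_pair_iff (c : Char) (s x y : List Char) :
    pvSplit1 c s = [x, y] ↔ s = x ++ c :: y ∧ c ∉ x ∧ c ∉ y := by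
  constructor
  · intro h
    refine ⟨?_, ?_, ?_⟩
    · have := pvJoin1_split c s
      rw [h] at this
      simpa [pvJoin1] using this.symm
    · exact pvSplit1_mem c s x (by rw [h]; exact List.mem_cons_self)
    · exact pvSplit1_mem c s y (by rw [h]; simp)
  · rintro ⟨rfl, hx, hy⟩
    rw [pvSplit1_append c x y hx, pvSplit1_no c y hy]

theorem pvAppend_cons_inj (c : Char) (x y m t : List Char) (hx : c ∉ x) (hm : c ∉ m) :
    x ++ c :: y = m ++ c :: t ↔ x = m ∧ y = t := by
  constructor
  · intro h
    induction x generalizing m with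
    | nil =>
      cases m with
      | nil => simpa using h
      | cons b m' =>
        simp only [List.nil_append, List.cons_append, List.cons.injEq] at h
        exact absurd h.1.symm (fun he => hm (by simp [he]))
    | cons a x' ih =>
      cases m with
      | nil =>
        simp only [List.cons_append, List.nil_append, List.cons.injEq] at h
        exact absurd h.1 (fun he => hx (by simp [he]))
      | cons b m' =>
        simp only [List.cons_append, List.cons.injEq] at h
        have := ih m' (fun hc => hx (List.mem_cons_of_mem _ hc))
          (fun hc => hm (List.mem_cons_of_mem _ hc)) h.2
        exact ⟨by rw [h.1, this.1], this.2⟩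
  · rintro ⟨rfl, rfl⟩; rfl

theorem pvSplit?_eq (path : String) (c : Char) (sep : String) (hsep : sep.toList = [c]) :
    PySem.Str.split? path sep = some ((pvSplit1 c path.toList).map String.ofList) := by
  rw [PySem.Str.split?, PySem.Chars.split?, hsep]
  simp [pvSplitOn_eq]

-- the string-equality condition in A's scan, under a known decomposition of path
theorem pvCond_iff (path X Y m t : String)
    (hdec : path.toList = X.toList ++ '_' :: Y.toList)
    (hX : '_' ∉ X.toList)
    (hm : '_' ∉ m.toList) :
    path = m ++ "_" ++ t ↔ X = m ∧ Y = t := by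
  rw [← String.toList_inj, hdec]
  rw [show (m ++ "_" ++ t).toList = m.toList ++ '_' :: t.toList by simp [String.toList_append]]
  rw [pvAppend_cons_inj _ _ _ _ _ hX hm, String.toList_inj, String.toList_inj]

-- first-match over the flattened pair list
def pvCond (path : String) (p : String × String) : Prop :=
  path = p.1 ++ "_" ++ p.2 ∨ path = p.2 ++ "_" ++ p.1

def pvFM (path item : String) : List (String × String) → String
  | [] => item
  | (m, t) :: rest =>
    if path == m ++ "_" ++ t || path == t ++ "_" ++ m then
      "emendatusenigmatica:" ++ m ++ "_" ++ t
    else pvFM path item rest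

def pvAllPairs : List (String × String) :=
  pvEmendatusMetals.flatMap (fun m => pvMaterialTypes.map (fun t => (m, t)))

theorem pvFM_inner (path item m : String) (ts : List String) (rest : List (String × String)) :
    pvFM path item (ts.map (fun t => (m, t)) ++ rest) =
      match pvInnerA path m ts with
      | some r => r
      | none => pvFM path item rest := by
  induction ts with
  | nil => simp [pvInnerA]
  | cons t ts' ih =>
    simp only [List.map_cons, List.cons_append, pvFM, pvInnerA]
    split
    · rfl
    · exact ih

theorem pvOuterA_eq_FM (path item : String) (ms : List String) :
    pvOuterA path item ms = pvFM path item (ms.flatMap (fun m => pvMaterialTypes.map (fun t => (m, t)))) := by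
  induction ms with
  | nil => simp [pvOuterA, pvFM]
  | cons m ms' ih =>
    rw [List.flatMap_cons, pvFM_inner]
    simp only [pvOuterA]
    split <;> simp_all

theorem pvFM_none (path item : String) (L : List (String × String))
    (h : ∀ p ∈ L, ¬ pvCond path p) : pvFM path item L = item := by
  induction L with
  | nil => rfl
  | cons p rest ih =>
    obtain ⟨m, t⟩ := p
    have hp := h (m, t) List.mem_cons_self
    rw [pvFM, if_neg]
    · exact ih (fun q hq => h q (List.mem_cons_of_mem _ hq))
    · simp only [Bool.or_eq_true, beq_iff_eq]
      exact fun hc => hp hc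

theorem pvFM_unique (path item : String) (L : List (String × String)) (p : String × String)
    (hmem : p ∈ L) (hC : pvCond path p) (huniq : ∀ q ∈ L, pvCond path q → q = p) :
    pvFM path item L = "emendatusenigmatica:" ++ p.1 ++ "_" ++ p.2 := by
  induction L with
  | nil => simp at hmem
  | cons q rest ih =>
    obtain ⟨m, t⟩ := q
    by_cases hq : pvCond path (m, t)
    · have : (m, t) = p := huniq (m, t) List.mem_cons_self hq
      subst this
      rw [pvFM, if_pos]
      simp only [Bool.or_eq_true, beq_iff_eq]
      exact hq
    · rw [pvFM, if_neg]
      · have hp : p ∈ rest := by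
          rcases List.mem_cons.mp hmem with h | h
          · exact absurd (h ▸ hC) hq
          · exact h
        exact ih hp (fun r hr hcr => huniq r (List.mem_cons_of_mem _ hr) hcr)
      · simp only [Bool.or_eq_true, beq_iff_eq]
        exact fun hc => hq hc

theorem pvPairs_facts : ∀ p ∈ pvAllPairs,
    '_' ∉ p.1.toList ∧ '_' ∉ p.2.toList ∧ p.1 ∈ pvEmendatusMetals ∧ p.2 ∈ pvMaterialTypes := by
  decide

theorem pvDisj : ∀ m ∈ pvEmendatusMetals, ∀ t ∈ pvMaterialTypes, m ≠ t := by
  decide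

theorem pvNoPairCond (path : String)
    (hshape : ∀ x y : List Char, pvSplit1 '_' path.toList ≠ [x, y]) :
    ∀ p ∈ pvAllPairs, ¬ pvCond path p := by
  rintro ⟨m, t⟩ hp hc
  obtain ⟨h1, h2, -, -⟩ := pvPairs_facts (m, t) hp
  rcases hc with h | h
  · have hd : path.toList = m.toList ++ '_' :: t.toList := by
      rw [h]; simp [String.toList_append]
    exact hshape _ _ ((pvSplit1_pair_iff '_' _ _ _).mpr ⟨hd, h1, h2⟩)
  · have hd : path.toList = t.toList ++ '_' :: m.toList := by
      rw [h]; simp [String.toList_append]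
    exact hshape _ _ ((pvSplit1_pair_iff '_' _ _ _).mpr ⟨hd, h2, h1⟩)

theorem pvMetalsSet_eq : pvMetalsSet = pvEmendatusMetals := by decide
theorem pvTypesSet_eq : pvTypesSet = pvMaterialTypes := by decide

-- the core: for any path and fallback item, A's scan equals B's split-and-lookup
theorem pvCore (path item : String) :
    pvOuterA path item pvEmendatusMetals =
      (match PySem.Str.split? path "_" with
       | none => item
       | some parts2 =>
       match parts2 with
       | [] => item
       | [_] => item
       | _ :: _ :: _ :: _ => item
       | [x, y] =>
         if pvMetalsSet.contains x && pvTypesSet.contains y then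
           "emendatusenigmatica:" ++ x ++ "_" ++ y
         else if pvTypesSet.contains x && pvMetalsSet.contains y then
           "emendatusenigmatica:" ++ y ++ "_" ++ x
         else item) := by
  rw [pvSplit?_eq path '_' "_" (by decide)]
  rw [show pvOuterA path item pvEmendatusMetals = pvFM path item pvAllPairs from pvOuterA_eq_FM path item pvEmendatusMetals]
  cases hsp : pvSplit1 '_' path.toList with
  | nil => exact pvFM_none path item pvAllPairs (pvNoPairCond path (by simp [hsp]))
  | cons x0 l0 =>
    cases l0 with
    | nil =>
      simp only [List.map_cons, List.map_nil]
      exact pvFM_none path item pvAllPairs (pvNoPairCond path (by simp [hsp]))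
    | cons y0 l1 =>
      cases l1 with
      | cons z0 l2 =>
        simp only [List.map_cons]
        exact pvFM_none path item pvAllPairs (pvNoPairCond path (by simp [hsp]))
      | nil =>
        simp only [List.map_cons, List.map_nil]
        obtain ⟨hdec, hx0, hy0⟩ := (pvSplit1_pair_iff '_' _ _ _).mp hsp
        set X := String.ofList x0 with hX
        set Y := String.ofList y0 with hY
        have hXt : X.toList = x0 := String.toList_ofList
        have hYt : Y.toList = y0 := String.toList_ofList
        have hdec' : path.toList = X.toList ++ '_' :: Y.toList := by rw [hXt, hYt]; exact hdec
        have hXu : '_' ∉ X.toList := by rw [hXt]; exact hx0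
        -- condition characterisation for every pair
        have hcond : ∀ p ∈ pvAllPairs, pvCond path p ↔ ((X = p.1 ∧ Y = p.2) ∨ (X = p.2 ∧ Y = p.1)) := by
          rintro ⟨m, t⟩ hp
          obtain ⟨h1, h2, -, -⟩ := pvPairs_facts (m, t) hp
          unfold pvCond
          rw [pvCond_iff path X Y m t hdec' hXu h1, pvCond_iff path X Y t m hdec' hXu h2]
        have hmem : ∀ (s : String) (l : List String), (l.contains s = true) ↔ s ∈ l := by
          intro s l; exact List.contains_iff_mem
        by_cases hfirst : X ∈ pvEmendatusMetals ∧ Y ∈ pvMaterialTypes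
        · -- first branch fires: the unique matching pair is (X, Y)
          rw [if_pos (by rw [pvMetalsSet_eq, pvTypesSet_eq]; simp [hmem, hfirst.1, hfirst.2])]
          refine pvFM_unique path item pvAllPairs (X, Y)
            (by unfold pvAllPairs; exact List.mem_flatMap.mpr ⟨X, hfirst.1, List.mem_map.mpr ⟨Y, hfirst.2, rfl⟩⟩)
            (Or.inl (by rw [← String.toList_inj]; simp [String.toList_append, hdec'])) ?_
          rintro ⟨m, t⟩ hq hcq
          obtain ⟨-, -, -, htT⟩ := pvPairs_facts (m, t) hq
          rcases (hcond (m, t) hq).mp hcq with ⟨rfl, rfl⟩ | ⟨h3, h4⟩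
          · rfl
          · exact absurd h3 (pvDisj X hfirst.1 t htT)
        · rw [if_neg (by rw [pvMetalsSet_eq, pvTypesSet_eq]; simpa [hmem] using hfirst)]
          by_cases hsecond : X ∈ pvMaterialTypes ∧ Y ∈ pvEmendatusMetals
          · -- second branch fires: the unique matching pair is (Y, X)
            rw [if_pos (by rw [pvMetalsSet_eq, pvTypesSet_eq]; simp [hmem, hsecond.1, hsecond.2])]
            refine pvFM_unique path item pvAllPairs (Y, X)
              (by unfold pvAllPairs; exact List.mem_flatMap.mpr ⟨Y, hsecond.2, List.mem_map.mpr ⟨X, hsecond.1, rfl⟩⟩)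
              (Or.inr (by rw [← String.toList_inj]; simp [String.toList_append, hdec'])) ?_
            rintro ⟨m, t⟩ hq hcq
            obtain ⟨-, -, hmM, -⟩ := pvPairs_facts (m, t) hq
            rcases (hcond (m, t) hq).mp hcq with ⟨h3, h4⟩ | ⟨h3, h4⟩
            · exact absurd h3.symm (pvDisj m hmM X hsecond.1)
            · rw [h3, h4]
          · rw [if_neg (by rw [pvMetalsSet_eq, pvTypesSet_eq]; simpa [hmem] using hsecond)]
            refine pvFM_none path item pvAllPairs ?_
            rintro ⟨m, t⟩ hq hcq
            obtain ⟨-, -, hmM, htT⟩ := pvPairs_facts (m, t) hq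
            rcases (hcond (m, t) hq).mp hcq with ⟨h3, h4⟩ | ⟨h3, h4⟩
            · exact hfirst ⟨h3 ▸ hmM, h4 ▸ htT⟩
            · exact hsecond ⟨h3 ▸ htT, h4 ▸ hmM⟩

theorem pvMain (item : String) : repl_with_ee_variant_py item = repl_with_ee_variant_py_alt item := by
  unfold repl_with_ee_variant_py repl_with_ee_variant_py_alt
  rw [pvSplit?_eq item ':' ":" (by decide)]
  cases h : pvSplit1 ':' item.toList with
  | nil => rfl
  | cons a l0 =>
    cases l0 with
    | nil => rfl
    | cons b l1 =>
      cases l1 with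
      | cons c2 l2 => rfl
      | nil =>
        simp only [List.map_cons, List.map_nil]
        by_cases hns : String.ofList a == "emendatusenigmatica"
        · rw [if_pos hns, if_pos hns]
        · rw [if_neg hns, if_neg hns]
          exact pvCore (String.ofList b) item

-- ===== VERDICT (by name: the statement is the Claim_ definition above) =====
theorem repl_with_ee_variant_py_spec : Claim_equal_repl_with_ee_variant_py := by
  intro item _
  unfold Spec_repl_with_ee_variant_py
  exact pvMain item
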